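-- pv_equiv track=rewrite | github.com/shft1/Algorithms-Structures-Tasks | Practicum/8_sprint/K - Сравнить две строки/solution.py | solution
-- ===== SOURCE A (Python) =====
-- def solution(a, b):
--     p_a, p_b = 0, 0
--     while p_a != len(a) and p_b != len(b):
--         if ord(a[p_a]) % 2 == 0 and ord(b[p_b]) % 2 == 0:
--             if a[p_a] < b[p_b]:
--                 return -1
--             if a[p_a] > b[p_b]:
--                 return 1
--         if ord(a[p_a]) % 2 != 0 and ord(b[p_b]) % 2 == 0:
--             p_a += 1
--         elif ord(a[p_a]) % 2 == 0 and ord(b[p_b]) % 2 != 0: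
--             p_b += 1
--         else:
--             p_a += 1
--             p_b += 1
--     if p_a != len(a):
--         for i in range(p_a, len(a)):
--             if ord(a[i]) % 2 == 0:
--                 return 1
--     if p_b != len(b):
--         for i in range(p_b, len(b)):
--             if ord(b[i]) % 2 == 0:
--                 return -1
--     return 0
-- ===== SOURCE B (Python) =====
-- def solution(a, b):
--     fa = [c for c in a if ord(c) % 2 == 0]
--     fb = [c for c in b if ord(c) % 2 == 0]
--     return (fa > fb) - (fa < fb)
-- ===== Notes on version B (the rewrite author's own statement) =====
-- stated objective: simpler
-- what changed: Replaced the interleaved aligned two-pointer merge plus two leftover scans by two independent filter passes and one lexicographic list comparison.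
import Mathlib
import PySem

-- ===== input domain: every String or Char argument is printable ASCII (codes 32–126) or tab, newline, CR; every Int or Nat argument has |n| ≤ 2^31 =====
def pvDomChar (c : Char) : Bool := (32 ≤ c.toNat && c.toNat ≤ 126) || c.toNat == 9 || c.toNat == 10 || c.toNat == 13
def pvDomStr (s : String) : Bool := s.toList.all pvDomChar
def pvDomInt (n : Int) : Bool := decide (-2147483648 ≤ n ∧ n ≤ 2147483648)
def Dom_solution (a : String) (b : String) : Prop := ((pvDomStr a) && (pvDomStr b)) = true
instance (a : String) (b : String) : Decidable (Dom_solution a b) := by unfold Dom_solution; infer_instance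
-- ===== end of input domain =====

-- B replaces A's interleaved two-pointer merge (+ leftover scans) with two filter
-- passes and one lexicographic comparison; objective: simpler.

-- ===== PORT A =====
-- the trailing 'for i in range(p_a, len(a)): if even: return 1' scans (the loop is List.any)
def solTailA (la lb : List Char) : Int :=
  if la.any (fun c => c.toNat % 2 == 0) then 1
  else if lb.any (fun c => c.toNat % 2 == 0) then -1
  else 0

-- the while loop: heads play the roles of a[p_a], b[p_b]; advancing a pointer drops a head
def solLoop : List Char → List Char → Int
  | x :: xs, y :: ys =>
    if x.toNat % 2 == 0 && y.toNat % 2 == 0 then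
      if x < y then -1
      else if y < x then 1
      else solLoop xs ys        -- both even, equal: fall through to the else branch (advance both)
    else if !(x.toNat % 2 == 0) && (y.toNat % 2 == 0) then solLoop xs (y :: ys)
    else if (x.toNat % 2 == 0) && !(y.toNat % 2 == 0) then solLoop (x :: xs) ys
    else solLoop xs ys
  | la, lb => solTailA la lb
termination_by la lb => la.length + lb.length
decreasing_by all_goals simp <;> omega

def solution (a : String) (b : String) : Int := solLoop a.toList b.toList

-- ===== PORT B =====
-- Python's list comparison (fa > fb) - (fa < fb) as a lexicographic recursion
def lexCmp : List Char → List Char → Int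
  | [], [] => 0
  | [], _ :: _ => -1
  | _ :: _, [] => 1
  | x :: xs, y :: ys => if x < y then -1 else if y < x then 1 else lexCmp xs ys

def solution_alt (a : String) (b : String) : Int :=
  lexCmp (a.toList.filter (fun c => c.toNat % 2 == 0))
         (b.toList.filter (fun c => c.toNat % 2 == 0))

-- ===== PRECONDITION & SPEC =====
def Spec_solution (a : String) (b : String) (out : Int) : Prop := out = solution_alt a b
instance (a : String) (b : String) (out : Int) : Decidable (Spec_solution a b out) := by unfold Spec_solution; infer_instance

-- ===== CLAIM (what is proved, stated in full; the proofs are below) =====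
def Claim_equal_solution : Prop := ∀ (a : String) (b : String), Dom_solution a b → Spec_solution a b (solution a b)

-- ===== LEMMAS AND PROOFS =====
theorem filter_nil_iff_any (p : Char → Bool) (l : List Char) :
    l.filter p = [] ↔ l.any p = false := by
  simp [List.filter_eq_nil_iff, List.any_eq_false]

theorem lexCmp_nil_right (l : List Char) (h : l ≠ []) : lexCmp l [] = 1 := by
  cases l with
  | nil => exact absurd rfl h
  | cons x xs => rfl

theorem solTail_eq (la lb : List Char) (h : la = [] ∨ lb = []) :
    solTailA la lb = lexCmp (la.filter (fun c => c.toNat % 2 == 0)) (lb.filter (fun c => c.toNat % 2 == 0)) := by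
  rcases h with h | h <;> subst h
  · by_cases hf : lb.filter (fun c => c.toNat % 2 == 0) = []
    · have := (filter_nil_iff_any _ lb).mp hf
      simp [solTailA, this, hf, lexCmp]
    · have hany : lb.any (fun c => c.toNat % 2 == 0) = true := by
        by_contra hc
        exact hf ((filter_nil_iff_any _ lb).mpr (Bool.eq_false_iff.mpr hc))
      cases hg : lb.filter (fun c => c.toNat % 2 == 0) with
      | nil => exact absurd hg hf
      | cons z zs => simp [solTailA, hany, lexCmp]
  · by_cases hf : la.filter (fun c => c.toNat % 2 == 0) = []
    · have := (filter_nil_iff_any _ la).mp hf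
      simp [solTailA, this, hf, lexCmp]
    · have hany : la.any (fun c => c.toNat % 2 == 0) = true := by
        by_contra hc
        exact hf ((filter_nil_iff_any _ la).mpr (Bool.eq_false_iff.mpr hc))
      simp [solTailA, hany, lexCmp_nil_right _ hf]

theorem solLoop_eq_bounded (n : Nat) : ∀ la lb : List Char, la.length + lb.length ≤ n →
    solLoop la lb = lexCmp (la.filter (fun c => c.toNat % 2 == 0)) (lb.filter (fun c => c.toNat % 2 == 0)) := by
  induction n with
  | zero =>
    intro la lb hle
    have h1 : la = [] := List.eq_nil_of_length_eq_zero (by omega)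
    subst h1
    rw [solLoop.eq_def]
    exact solTail_eq _ _ (Or.inl rfl)
  | succ n ih =>
    intro la lb hle
    cases la with
    | nil => rw [solLoop.eq_def]; exact solTail_eq _ _ (Or.inl rfl)
    | cons x xs =>
      cases lb with
      | nil => rw [solLoop.eq_def]; exact solTail_eq _ _ (Or.inr rfl)
      | cons y ys =>
        have hlen : xs.length + (y :: ys).length ≤ n := by simp at hle ⊢; omega
        have hlen2 : (x :: xs).length + ys.length ≤ n := by simp at hle ⊢; omega
        have hlen3 : xs.length + ys.length ≤ n := by simp at hle; omega
        rw [solLoop]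
        by_cases hx : (x.toNat % 2 == 0) = true
        · by_cases hy : (y.toNat % 2 == 0) = true
          · simp only [hx, hy, Bool.and_self, if_true]
            rw [ih xs ys hlen3]
            simp [hx, hy, lexCmp]
          · simp only [hx, hy, Bool.and_false, Bool.not_true, Bool.and_true,
              Bool.not_false, Bool.false_eq_true, if_false, if_true]
            rw [ih _ ys hlen2]
            simp [List.filter_cons, hy]
        · have hy' : (!(x.toNat % 2 == 0) && (y.toNat % 2 == 0)) = (y.toNat % 2 == 0) := by
            simp [hx]
          by_cases hy : (y.toNat % 2 == 0) = true
          · simp only [hx, hy, Bool.false_and, Bool.false_eq_true, if_false]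
            rw [ih xs _ hlen]
            simp [List.filter_cons, hx]
          · simp only [hx, hy, Bool.false_and, Bool.and_false, Bool.false_eq_true, if_false]
            rw [ih xs ys hlen3]
            simp [hx, hy]

theorem solLoop_eq (la lb : List Char) :
    solLoop la lb = lexCmp (la.filter (fun c => c.toNat % 2 == 0)) (lb.filter (fun c => c.toNat % 2 == 0)) :=
  solLoop_eq_bounded (la.length + lb.length) la lb (le_refl _)

-- ===== VERDICT (by name: the statement is the Claim_ definition above) =====
theorem solution_spec : Claim_equal_solution := by
  intro a b _
  unfold Spec_solution solution solution_alt
  exact solLoop_eq _ _
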